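-- pv_equiv track=rewrite | github.com/blas1306/MathTeX_Studio | src/parser_common.py | _has_disabled_apostrophe_operator
-- ===== SOURCE A (Python) =====
-- def _is_apostrophe_operator(text: str, idx: int) -> bool:
--     """Detecta si una comilla simple actua como operador postfix estilo Octave."""
--     if idx < 0 or idx >= len(text) or text[idx] != "'":
--         return False
--     j = idx - 1
--     while j >= 0 and text[j].isspace():
--         j -= 1
--     if j < 0:
--         return False
--     prev = text[j]
--     return prev.isalnum() or prev in {")", "]", "}", "_"}
--
-- def _has_disabled_apostrophe_operator(text: str) -> bool:
--     in_str = ""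
--     escape = False
--     for idx, ch in enumerate(text):
--         if in_str:
--             if escape:
--                 escape = False
--             elif ch == "\\":
--                 escape = True
--             elif ch == in_str:
--                 in_str = ""
--             continue
--         if ch in {"'", '"'}:
--             if ch == "'":
--                 prev_idx = idx - 1
--                 while prev_idx >= 0 and text[prev_idx].isspace():
--                     prev_idx -= 1
--                 if prev_idx >= 0 and text[prev_idx] == ".":
--                     continue
--                 if _is_apostrophe_operator(text, idx):
--                     return True
--             in_str = ch
--     return False
-- ===== SOURCE B (Python) =====
-- def _has_disabled_apostrophe_operator(text: str) -> bool:
--     in_str = ""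
--     escape = False
--     last = ""  # last non-whitespace character seen so far ("" = none yet)
--     for ch in text:
--         if in_str:
--             if escape:
--                 escape = False
--             elif ch == "\\":
--                 escape = True
--             elif ch == in_str:
--                 in_str = ""
--         elif ch == "'":
--             if last == ".":
--                 pass  # preceded by '.', ignore
--             elif last and (last.isalnum() or last in ")]}_"):
--                 return True
--             else:
--                 in_str = ch
--         elif ch == '"':
--             in_str = ch
--         if not ch.isspace():
--             last = ch
--     return False
-- ===== Notes on version B (the rewrite author's own statement) =====
-- stated objective: simpler
-- what changed: B replaces A's backward whitespace-skipping while-loops and the _is_apostrophe_operator helper with a single forward-tracked last-nonwhitespace-character variable, making the scan one pass with no re-scanning.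
import Mathlib
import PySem

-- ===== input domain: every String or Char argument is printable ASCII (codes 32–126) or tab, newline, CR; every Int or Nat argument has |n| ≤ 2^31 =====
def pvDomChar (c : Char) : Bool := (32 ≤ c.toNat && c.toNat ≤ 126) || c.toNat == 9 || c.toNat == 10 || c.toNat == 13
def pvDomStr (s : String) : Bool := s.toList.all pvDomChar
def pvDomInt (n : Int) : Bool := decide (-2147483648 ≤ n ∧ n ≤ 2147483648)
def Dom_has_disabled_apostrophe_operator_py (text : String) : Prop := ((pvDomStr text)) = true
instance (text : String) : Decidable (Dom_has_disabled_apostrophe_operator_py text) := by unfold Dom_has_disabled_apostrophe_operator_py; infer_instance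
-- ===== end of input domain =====

-- B keeps the single scan but tracks the last non-whitespace character forward,
-- dropping A's backward while-loops and the _is_apostrophe_operator helper (objective: simpler).


-- ===== PORT A =====
-- `while j >= 0 and text[j].isspace(): j -= 1` (indexing is always in range when taken)
def pvSkipWs (s : List Char) (j : Int) : Int :=
  if h : j < 0 then j
  else if PySem.Chars.isspace (s.getD j.toNat ' ') then pvSkipWs s (j - 1)
  else j
termination_by (j + 1).toNat
decreasing_by omega

-- _is_apostrophe_operator
def pvIsAposOp (s : List Char) (idx : Int) : Bool :=
  if idx < 0 ∨ (s.length : Int) ≤ idx ∨ s.getD idx.toNat ' ' ≠ '\'' then false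
  else
    let j := pvSkipWs s (idx - 1)
    if j < 0 then false
    else
      let prev := s.getD j.toNat ' '
      PySem.Chars.isalnum prev || prev ∈ [')', ']', '}', '_']

-- the `for idx, ch in enumerate(text)` loop of _has_disabled_apostrophe_operator
def pvALoop (s : List Char) : Nat → List Char → Option Char → Bool → Bool
  | _, [], _, _ => false
  | idx, ch :: rest, some q, escape =>
    if escape then pvALoop s (idx + 1) rest (some q) false
    else if ch = '\\' then pvALoop s (idx + 1) rest (some q) true
    else if ch = q then pvALoop s (idx + 1) rest none false
    else pvALoop s (idx + 1) rest (some q) false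
  | idx, ch :: rest, none, _ =>
    if ch = '\'' ∨ ch = '"' then
      if ch = '\'' then
        let p := pvSkipWs s ((idx : Int) - 1)
        if 0 ≤ p ∧ s.getD p.toNat ' ' = '.' then pvALoop s (idx + 1) rest none false
        else if pvIsAposOp s idx then true
        else pvALoop s (idx + 1) rest (some ch) false
      else pvALoop s (idx + 1) rest (some ch) false
    else pvALoop s (idx + 1) rest none false

def has_disabled_apostrophe_operator_py (text : String) : Bool :=
  pvALoop text.toList 0 text.toList none false

-- ===== PORT B =====
-- single pass; `last` is the last non-whitespace character seen (none = sentinel "")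
def pvBLoop : List Char → Option Char → Bool → Option Char → Bool
  | [], _, _, _ => false
  | ch :: rest, inStr, escape, last =>
    let last' := if PySem.Chars.isspace ch then last else some ch
    match inStr with
    | some q =>
      if escape then pvBLoop rest (some q) false last'
      else if ch = '\\' then pvBLoop rest (some q) true last'
      else if ch = q then pvBLoop rest none false last'
      else pvBLoop rest (some q) false last'
    | none =>
      if ch = '\'' then
        if last = some '.' then pvBLoop rest none false last'
        else if (match last with
                 | some c => PySem.Chars.isalnum c || c ∈ [')', ']', '}', '_']
                 | none => false) then true
        else pvBLoop rest (some ch) false last'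
      else if ch = '"' then pvBLoop rest (some ch) false last'
      else pvBLoop rest none false last'

def has_disabled_apostrophe_operator_py_alt (text : String) : Bool :=
  pvBLoop text.toList none false none

-- ===== PRECONDITION & SPEC =====
def Spec_has_disabled_apostrophe_operator_py (text : String) (out : Bool) : Prop := out = has_disabled_apostrophe_operator_py_alt text
instance (text : String) (out : Bool) : Decidable (Spec_has_disabled_apostrophe_operator_py text out) := by unfold Spec_has_disabled_apostrophe_operator_py; infer_instance

-- ===== CLAIM (what is proved, stated in full; the proofs are below) =====
def Claim_equal_has_disabled_apostrophe_operator_py : Prop := ∀ (text : String), Dom_has_disabled_apostrophe_operator_py text → Spec_has_disabled_apostrophe_operator_py text (has_disabled_apostrophe_operator_py text)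

-- ===== LEMMAS AND PROOFS =====

-- the last non-whitespace character of a prefix (B's `last` after scanning it)
def pvLns (l : List Char) : Option Char :=
  l.foldl (fun acc c => if PySem.Chars.isspace c then acc else some c) none

lemma pvLns_append (l : List Char) (c : Char) :
    pvLns (l ++ [c]) = if PySem.Chars.isspace c then pvLns l else some c := by
  simp [pvLns, List.foldl_append]

lemma pvSkipWs_eq (s : List Char) (j : Int) :
    pvSkipWs s j = if j < 0 then j
      else if PySem.Chars.isspace (s.getD j.toNat ' ') then pvSkipWs s (j - 1) else j := by
  rw [pvSkipWs.eq_def]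
  split_ifs <;> simp_all

lemma pvSkipWs_spec (s : List Char) : ∀ k : Nat, k ≤ s.length →
    (pvLns (s.take k) = none ∧ pvSkipWs s ((k : Int) - 1) < 0) ∨
    (∃ c, pvLns (s.take k) = some c ∧ 0 ≤ pvSkipWs s ((k : Int) - 1) ∧
      s.getD (pvSkipWs s ((k : Int) - 1)).toNat ' ' = c) := by
  intro k
  induction k with
  | zero => intro _; left; constructor
            · simp [pvLns]
            · rw [pvSkipWs_eq]; norm_num
  | succ n ih =>
    intro hk
    have hn : n < s.length := by omega
    have htake : s.take (n + 1) = s.take n ++ [s[n]] := by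
      rw [List.take_add_one]; simp [List.getElem?_eq_getElem hn]
    have hget : s.getD n ' ' = s[n] := by simp [List.getD, List.getElem?_eq_getElem hn]
    rw [show (((n + 1 : Nat) : Int) - 1) = (n : Int) by push_cast; ring]
    rw [htake, pvLns_append, pvSkipWs_eq]
    have h0 : ¬ ((n : Int) < 0) := by omega
    rw [if_neg h0]
    have hnn : (n : Int).toNat = n := by omega
    rw [hnn, hget]
    by_cases hsp : PySem.Chars.isspace s[n]
    · rw [if_pos hsp, if_pos hsp]
      exact ih (by omega)
    · rw [if_neg hsp, if_neg hsp]
      right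
      exact ⟨s[n], rfl, by omega, by simp [List.getElem?_eq_getElem hn]⟩

lemma pvLoop_eq (s : List Char) : ∀ (t : List Char) (k : Nat)
    (inStr : Option Char) (esc : Bool), s.drop k = t →
    pvALoop s k t inStr esc = pvBLoop t inStr esc (pvLns (s.take k)) := by
  intro t
  induction t with
  | nil => intro k inStr esc _; cases inStr <;> simp [pvALoop, pvBLoop]
  | cons c rest ih =>
    intro k inStr esc hdrop
    have hk : k < s.length := by
      by_contra h
      rw [List.drop_eq_nil_of_le (by omega)] at hdrop
      simp at hdrop
    have hc : s[k] = c := by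
      have h1 : s[k]? = some c := by
        rw [← List.head?_drop, hdrop]; rfl
      rw [List.getElem?_eq_getElem hk] at h1
      exact Option.some.inj h1
    have hrest : s.drop (k + 1) = rest := by
      have h2 : s.drop (k + 1) = (s.drop k).drop 1 := by rw [List.drop_drop]
      rw [h2, hdrop]; rfl
    have htake : pvLns (s.take (k + 1)) =
        if PySem.Chars.isspace c then pvLns (s.take k) else some c := by
      have h1 : s.take (k + 1) = s.take k ++ [c] := by
        rw [List.take_add_one]; simp [List.getElem?_eq_getElem hk, hc]
      rw [h1, pvLns_append]
    have IH : ∀ i e, pvALoop s (k + 1) rest i e = pvBLoop rest i e (pvLns (s.take (k + 1))) :=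
      fun i e => ih (k + 1) i e hrest
    cases inStr with
    | some q =>
      simp only [pvALoop, pvBLoop]
      split_ifs <;> rw [IH, htake] <;> simp_all
    | none =>
      have hsQ : PySem.Chars.isspace '\'' = false := by decide
      have hsD : PySem.Chars.isspace '"' = false := by decide
      rcases pvSkipWs_spec s k (by omega) with ⟨hln, hlt⟩ | ⟨d, hld, hge, hgd⟩
      · -- no non-whitespace char before position k
        by_cases h1 : c = '\''
        · subst h1
          have hAp : pvIsAposOp s k = false := by
            unfold pvIsAposOp
            have hcond : ¬ (((k : Nat) : Int) < 0 ∨ (s.length : Int) ≤ ((k : Nat) : Int) ∨ s.getD ((k : Nat) : Int).toNat ' ' ≠ '\'') := by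
              push Not
              refine ⟨by omega, by omega, ?_⟩
              have h2 : ((k : Nat) : Int).toNat = k := by omega
              rw [h2]
              simp [List.getD, List.getElem?_eq_getElem hk, hc]
            rw [if_neg hcond, if_pos hlt]
          have hnd : ¬ (0 ≤ pvSkipWs s ((k : Int) - 1) ∧ s.getD (pvSkipWs s ((k : Int) - 1)).toNat ' ' = '.') := by
            intro h; omega
          simp only [pvALoop, pvBLoop]
          rw [if_neg hnd]
          simp [hAp, IH, htake, hln, hsQ]
        · by_cases h2 : c = '"'
          · subst h2
            simp only [pvALoop, pvBLoop]
            simp [show ¬ ('"' : Char) = '\'' from by decide, IH, htake, hsD]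
          · simp only [pvALoop, pvBLoop]
            rw [if_neg (show ¬ (c = '\'' ∨ c = '"') by tauto), IH, htake]
            simp [h1, h2]
      · -- last non-whitespace char before k is d at index pvSkipWs s (k-1)
        by_cases h1 : c = '\''
        · subst h1
          by_cases hdot : d = '.'
          · subst hdot
            have hd : 0 ≤ pvSkipWs s ((k : Int) - 1) ∧ s.getD (pvSkipWs s ((k : Int) - 1)).toNat ' ' = '.' :=
              ⟨hge, hgd⟩
            simp only [pvALoop, pvBLoop]
            rw [if_pos hd]
            simp [hld, IH, htake, hsQ]
          · have hnd : ¬ (0 ≤ pvSkipWs s ((k : Int) - 1) ∧ s.getD (pvSkipWs s ((k : Int) - 1)).toNat ' ' = '.') := by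
              intro h; exact hdot (hgd ▸ h.2 ▸ rfl)
            have hAp : pvIsAposOp s k =
                (PySem.Chars.isalnum d || decide (d ∈ [')', ']', '}', '_'])) := by
              unfold pvIsAposOp
              have hcond : ¬ (((k : Nat) : Int) < 0 ∨ (s.length : Int) ≤ ((k : Nat) : Int) ∨ s.getD ((k : Nat) : Int).toNat ' ' ≠ '\'') := by
                push Not
                refine ⟨by omega, by omega, ?_⟩
                have h2 : ((k : Nat) : Int).toNat = k := by omega
                rw [h2]
                simp [List.getD, List.getElem?_eq_getElem hk, hc]
              rw [if_neg hcond, if_neg (by omega), hgd]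
            simp only [pvALoop, pvBLoop]
            rw [if_neg hnd, hAp]
            by_cases hop : (PySem.Chars.isalnum d || decide (d ∈ [')', ']', '}', '_'])) = true
            · rw [if_pos hop]
              simp [hld, hdot]
              exact Or.inl (by simpa using hop)
            · rw [if_neg hop]
              simp [hld, IH, htake, hsQ, hdot]
              intro h
              simp at hop
              rcases h with h | h | h | h | h <;> simp_all
        · by_cases h2 : c = '"'
          · subst h2
            simp only [pvALoop, pvBLoop]
            simp [show ¬ ('"' : Char) = '\'' from by decide, IH, htake, hsD]
          · simp only [pvALoop, pvBLoop]
            rw [if_neg (show ¬ (c = '\'' ∨ c = '"') by tauto), IH, htake]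
            simp [h1, h2]

-- ===== VERDICT (by name: the statement is the Claim_ definition above) =====
theorem has_disabled_apostrophe_operator_py_spec : Claim_equal_has_disabled_apostrophe_operator_py := by
  intro text _
  unfold Spec_has_disabled_apostrophe_operator_py has_disabled_apostrophe_operator_py has_disabled_apostrophe_operator_py_alt
  have := pvLoop_eq text.toList text.toList 0 none false (by simp)
  simpa [pvLns] using this
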